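-- pv_equiv track=rewrite | github.com/Rania-elh/holbertonschool-Markdown2HTML | markdown2html.py | convert_markdown_to_html
-- ===== SOURCE A (Python) =====
-- def convert_markdown_to_html(content):
--     """Convert markdown content to HTML"""
--     html_lines = []
--     current_list = []
--     in_list = False
--
--     for line in content.split('\n'):
--         # Skip empty lines
--         if not line.strip():
--             if in_list:
--                 # Close the current list
--                 html_lines.append("<ul>")
--                 for item in current_list:
--                     html_lines.append(f"<li>{item}</li>")
--                 html_lines.append("</ul>")
--                 current_list = []
--                 in_list = False
--             continue
--
--         # Handle unordered lists
--         if line.strip().startswith('- '):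
--             in_list = True
--             current_list.append(line.strip()[2:])
--             continue
--
--         # If we were in a list and now we're not
--         if in_list and not line.strip().startswith('- '):
--             html_lines.append("<ul>")
--             for item in current_list:
--                 html_lines.append(f"<li>{item}</li>")
--             html_lines.append("</ul>")
--             current_list = []
--             in_list = False
--
--         # Handle headers
--         if line.startswith('#'):
--             level = 0
--             for char in line:
--                 if char == '#':
--                     level += 1
--                 else:
--                     break
--
--             if 1 <= level <= 6:
--                 header_text = line[level:].strip()
--                 html_lines.append(f"<h{level}>{header_text}</h{level}>")
--         else:
--             if not in_list:
--                 html_lines.append(line)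
--
--     # If we end the file while still in a list
--     if in_list:
--         html_lines.append("<ul>")
--         for item in current_list:
--             html_lines.append(f"<li>{item}</li>")
--         html_lines.append("</ul>")
--
--     return '\n'.join(html_lines)
-- ===== SOURCE B (Python) =====
-- def convert_markdown_to_html(content):
--     """Convert markdown content to HTML"""
--     lines = content.split('\n')
--     out = []
--     i = 0
--     n = len(lines)
--     while i < n:
--         line = lines[i]
--         stripped = line.strip()
--         if stripped.startswith('- '):
--             # consume the whole consecutive run of list items
--             out.append('<ul>')
--             while i < n and lines[i].strip().startswith('- '):
--                 out.append('<li>' + lines[i].strip()[2:] + '</li>')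
--                 i += 1
--             out.append('</ul>')
--             continue
--         if stripped:
--             if line.startswith('#'):
--                 level = len(line) - len(line.lstrip('#'))
--                 if 1 <= level <= 6:
--                     out.append('<h%d>%s</h%d>' % (level, line[level:].strip(), level))
--             else:
--                 out.append(line)
--         i += 1
--     return '\n'.join(out)
-- ===== Notes on version B (the rewrite author's own statement) =====
-- stated objective: simpler
-- what changed: A's in_list flag + current_list accumulator with three duplicated flush blocks is replaced by a single run-consuming index loop: each line is classified once and a whole consecutive run of list items is consumed and emitted as one <ul> block, so no list state or flush duplication survives across iterations.
import Mathlib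
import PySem

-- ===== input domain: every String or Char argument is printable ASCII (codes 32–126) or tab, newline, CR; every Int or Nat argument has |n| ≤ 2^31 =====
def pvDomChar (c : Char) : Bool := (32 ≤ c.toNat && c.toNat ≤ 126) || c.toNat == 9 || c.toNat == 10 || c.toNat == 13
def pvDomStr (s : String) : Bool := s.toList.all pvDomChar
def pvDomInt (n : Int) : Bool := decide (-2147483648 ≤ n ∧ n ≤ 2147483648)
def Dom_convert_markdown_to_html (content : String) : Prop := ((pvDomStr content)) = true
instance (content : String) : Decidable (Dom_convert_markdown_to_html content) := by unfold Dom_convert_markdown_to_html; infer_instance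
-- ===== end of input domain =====

-- B replaces A's in_list/current_list flag machine by a run-consuming traversal (classify each
-- line, consume a whole consecutive run of list items at once); objective: simpler. Equivalent.

-- ===== PORT A =====
-- A's repeated "close the current list" block (append <ul>, each <li>, </ul>)
def pvFlushA (html cur : List String) : List String :=
  (html ++ ["<ul>"]) ++ cur.map (fun item => "<li>" ++ item ++ "</li>") ++ ["</ul>"]

-- A's 'for char in line: if char == '#': level += 1 else: break'
def pvLevelA : List Char → Nat
  | [] => 0
  | c :: cs => if c = '#' then pvLevelA cs + 1 else 0

-- one iteration of A's 'for line in content.split('\n')' over state (html_lines, current_list, in_list)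
def pvStepA (st : List String × List String × Bool) (line : String) :
    List String × List String × Bool :=
  let html := st.1; let cur := st.2.1; let inList := st.2.2
  if PySem.Str.strip line = "" then                                -- if not line.strip()
    if inList then (pvFlushA html cur, [], false) else (html, cur, inList)
  else if PySem.Str.startswith (PySem.Str.strip line) "- " then    -- line.strip().startswith('- ')
    (html, cur ++ [PySem.Str.slice (PySem.Str.strip line) (some 2) none], true)
  else
    -- if in_list and not line.strip().startswith('- '): close the list
    let html := if inList then pvFlushA html cur else html
    let cur := if inList then ([] : List String) else cur
    let inList := false ∧ inList                                   -- in_list = False inside the if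
    if PySem.Str.startswith line "#" then                          -- line.startswith('#')
      let level := pvLevelA line.toList
      if 1 ≤ level ∧ level ≤ 6 then
        (html ++ ["<h" ++ PySem.Int.toStr level ++ ">" ++
                  PySem.Str.strip (PySem.Str.slice line (some (level : Int)) none) ++
                  "</h" ++ PySem.Int.toStr level ++ ">"], cur, inList)
      else (html, cur, inList)
    else
      if inList then (html, cur, inList) else (html ++ [line], cur, inList)

-- A's final 'if in_list: close the list'
def pvFinalA (st : List String × List String × Bool) : List String :=
  if st.2.2 then pvFlushA st.1 st.2.1 else st.1

def convert_markdown_to_html (content : String) : String :=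
  -- content.split('\n'): sep ≠ "" so split? is always some; getD's default is never used
  PySem.Str.join "\n"
    (pvFinalA (((PySem.Str.split? content "\n").getD []).foldl pvStepA ([], [], false)))

-- ===== PORT B =====
-- B's line classifier for list items
def pvIsItem (line : String) : Bool := PySem.Str.startswith (PySem.Str.strip line) "- "

-- B's while-loop: consume a whole run of consecutive list items at once, else emit one line
def pvGoB : List String → List String
  | [] => []
  | line :: rest =>
    if pvIsItem line then
      ("<ul>" :: ("<li>" ++ PySem.Str.slice (PySem.Str.strip line) (some 2) none ++ "</li>") ::
        (rest.takeWhile pvIsItem).map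
          (fun l => "<li>" ++ PySem.Str.slice (PySem.Str.strip l) (some 2) none ++ "</li>") ++
        ["</ul>"]) ++ pvGoB (rest.dropWhile pvIsItem)
    else if PySem.Str.strip line = "" then
      pvGoB rest
    else if PySem.Str.startswith line "#" then
      -- level = len(line) - len(line.lstrip('#')) (ported by hand: exact for lstrip('#'))
      let level := line.toList.length - (line.toList.dropWhile (fun c => c == '#')).length
      if 1 ≤ level ∧ level ≤ 6 then
        ("<h" ++ PySem.Int.toStr level ++ ">" ++
         PySem.Str.strip (PySem.Str.slice line (some (level : Int)) none) ++
         "</h" ++ PySem.Int.toStr level ++ ">") :: pvGoB rest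
      else pvGoB rest
    else
      line :: pvGoB rest
  termination_by lines => lines.length
  decreasing_by
  · simpa using Nat.lt_succ_of_le (List.length_dropWhile_le _ _)
  all_goals simp

def convert_markdown_to_html_alt (content : String) : String :=
  PySem.Str.join "\n" (pvGoB ((PySem.Str.split? content "\n").getD []))

-- ===== PRECONDITION & SPEC =====
def Spec_convert_markdown_to_html (content : String) (out : String) : Prop := out = convert_markdown_to_html_alt content
instance (content : String) (out : String) : Decidable (Spec_convert_markdown_to_html content out) := by unfold Spec_convert_markdown_to_html; infer_instance

-- ===== CLAIM (what is proved, stated in full; the proofs are below) =====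
def Claim_equal_convert_markdown_to_html : Prop := ∀ (content : String), Dom_convert_markdown_to_html content → Spec_convert_markdown_to_html content (convert_markdown_to_html content)

-- ===== LEMMAS AND PROOFS =====

-- a blank line is not a list item
lemma pvIsItem_of_blank {line : String} (h : PySem.Str.strip line = "") :
    pvIsItem line = false := by
  simp [pvIsItem, h]
  decide

-- A's char loop computes the same level as B's length formula
lemma pvLevelA_eq (cs : List Char) :
    pvLevelA cs = cs.length - (cs.dropWhile (fun c => c == '#')).length := by
  induction cs with
  | nil => simp [pvLevelA]
  | cons c cs ih =>
    by_cases h : c = '#'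
    · have hle := List.length_dropWhile_le (fun c => c == '#') cs
      simp [pvLevelA, h, ih]
      omega
    · simp [pvLevelA, h]

-- on a non-blank non-item line both ports emit the same single-line output (header or plain)
lemma pvStepA_emit (line : String) (hb : ¬ PySem.Str.strip line = "")
    (hi : pvIsItem line = false) (html cur : List String) (b : Bool) :
    pvStepA (html, cur, b) line =
      ((if b then pvFlushA html cur else html) ++ pvGoB [line],
       if b then [] else cur, false) := by
  have hi' : ¬ (PySem.Str.startswith (PySem.Str.strip line) "- " = true) := by
    simp [pvIsItem] at hi; simp [hi]
  rw [pvGoB]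
  rw [if_neg (by simp [hi] : ¬ pvIsItem line = true), if_neg hb]
  simp only [pvStepA]
  rw [if_neg hb, if_neg hi']
  rw [show line.toList.length - (line.toList.dropWhile (fun c => c == '#')).length
        = pvLevelA line.toList from (pvLevelA_eq _).symm]
  by_cases hh : PySem.Str.startswith line "#" = true
  · rw [if_pos hh, if_pos hh]
    by_cases hl : 1 ≤ pvLevelA line.toList ∧ pvLevelA line.toList ≤ 6
    · rw [if_pos hl, if_pos hl]; cases b <;> simp [pvGoB]
    · rw [if_neg hl, if_neg hl]; cases b <;> simp [pvGoB]
  · rw [if_neg hh, if_neg hh]; cases b <;> simp [pvGoB]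

-- B emits a non-blank non-item line independently of what follows
lemma pvGoB_emit (line : String) (rest : List String) (hb : ¬ PySem.Str.strip line = "")
    (hi : pvIsItem line = false) :
    pvGoB (line :: rest) = pvGoB [line] ++ pvGoB rest := by
  rw [pvGoB, pvGoB]
  rw [if_neg (by simp [hi] : ¬ pvIsItem line = true),
      if_neg (by simp [hi] : ¬ pvIsItem line = true), if_neg hb, if_neg hb]
  by_cases hh : PySem.Str.startswith line "#" = true
  · rw [if_pos hh, if_pos hh]
    by_cases hl : 1 ≤ line.toList.length - (line.toList.dropWhile (fun c => c == '#')).length ∧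
        line.toList.length - (line.toList.dropWhile (fun c => c == '#')).length ≤ 6
    · rw [if_pos hl, if_pos hl]; simp [pvGoB]
    · rw [if_neg hl, if_neg hl]; simp [pvGoB]
  · rw [if_neg hh, if_neg hh]; simp [pvGoB]

-- the run of A from a state, including the final flush
def pvRunA (lines : List String) (html cur : List String) (b : Bool) : List String :=
  pvFinalA (lines.foldl pvStepA (html, cur, b))

-- the joint loop invariant: out of a list A continues like B; inside a list with pending
-- items cur, A emits the <ul> block for cur plus the rest of the run, then continues like B
lemma pvRunA_eq (lines : List String) :
    (∀ html, pvRunA lines html [] false = html ++ pvGoB lines) ∧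
    (∀ html cur, pvRunA lines html cur true =
      (html ++ ["<ul>"]) ++
        (cur ++ (lines.takeWhile pvIsItem).map
            (fun l => PySem.Str.slice (PySem.Str.strip l) (some 2) none)).map
          (fun item => "<li>" ++ item ++ "</li>") ++
        ["</ul>"] ++ pvGoB (lines.dropWhile pvIsItem)) := by
  induction lines with
  | nil =>
    constructor
    · intro html; simp [pvRunA, pvFinalA, pvGoB]
    · intro html cur; simp [pvRunA, pvFinalA, pvFlushA, pvGoB]
  | cons line rest ih =>
    constructor
    · intro html
      by_cases hb : PySem.Str.strip line = ""
      · rw [pvRunA, List.foldl_cons]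
        rw [show pvStepA (html, [], false) line = (html, [], false) by simp [pvStepA, hb]]
        rw [show (pvGoB (line :: rest)) = pvGoB rest by
          rw [pvGoB]; simp [pvIsItem_of_blank hb, hb]]
        exact ih.1 html
      · by_cases hi : pvIsItem line = true
        · rw [pvRunA, List.foldl_cons]
          rw [show pvStepA (html, [], false) line =
              (html, [PySem.Str.slice (PySem.Str.strip line) (some 2) none], true) by
            simp [pvIsItem] at hi; simp [pvStepA, hb, hi]]
          have h2 := (ih.2) html [PySem.Str.slice (PySem.Str.strip line) (some 2) none]
          rw [pvRunA] at h2
          rw [h2, pvGoB]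
          simp [hi]
        · have hi' : pvIsItem line = false := by simpa using hi
          rw [pvRunA, List.foldl_cons, pvStepA_emit line hb hi']
          simp only [Bool.false_eq_true, if_false]
          have h1 := ih.1 (html ++ pvGoB [line])
          rw [pvRunA] at h1
          rw [h1, pvGoB_emit line rest hb hi', List.append_assoc]
    · intro html cur
      by_cases hb : PySem.Str.strip line = ""
      · rw [pvRunA, List.foldl_cons]
        rw [show pvStepA (html, cur, true) line = (pvFlushA html cur, [], false) by
          simp [pvStepA, hb]]
        have h1 := ih.1 (pvFlushA html cur)
        rw [pvRunA] at h1
        rw [h1]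
        have hgo : pvGoB (line :: rest) = pvGoB rest := by
          rw [pvGoB]; simp [pvIsItem_of_blank hb, hb]
        simp [pvIsItem_of_blank hb, hgo, pvFlushA]
      · by_cases hi : pvIsItem line = true
        · rw [pvRunA, List.foldl_cons]
          rw [show pvStepA (html, cur, true) line =
              (html, cur ++ [PySem.Str.slice (PySem.Str.strip line) (some 2) none], true) by
            simp [pvIsItem] at hi; simp [pvStepA, hb, hi]]
          have h2 := ih.2 html (cur ++ [PySem.Str.slice (PySem.Str.strip line) (some 2) none])
          rw [pvRunA] at h2
          rw [h2]
          simp [hi]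
        · have hi' : pvIsItem line = false := by simpa using hi
          rw [pvRunA, List.foldl_cons, pvStepA_emit line hb hi']
          simp only [if_true]
          have h1 := ih.1 (pvFlushA html cur ++ pvGoB [line])
          rw [pvRunA] at h1
          rw [h1]
          simp only [List.takeWhile_cons, List.dropWhile_cons, hi', Bool.false_eq_true,
            if_false]
          rw [pvGoB_emit line rest hb hi']
          simp [pvFlushA]

-- ===== VERDICT (by name: the statement is the Claim_ definition above) =====
theorem convert_markdown_to_html_spec : Claim_equal_convert_markdown_to_html := by
  intro content _
  unfold Spec_convert_markdown_to_html convert_markdown_to_html convert_markdown_to_html_alt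
  have h := (pvRunA_eq ((PySem.Str.split? content "\n").getD [])).1 []
  rw [pvRunA] at h
  rw [h]
  simp
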